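-- pv_equiv track=rewrite | github.com/FabioCannavaro/BackJoon | 프로그래머스/2/42586. 기능개발/기능개발.py | solution
-- ===== SOURCE A (Python) =====
-- def solution(progresses, speeds):
--     answer = []
--     lst=[]
--     for i in range(len(speeds)):
--         cnt=0
--         while True:
--             progresses[i]+=speeds[i]
--             cnt+=1
--             if progresses[i]>=100:
--                 lst.append(cnt)
--                 break
--     for i in range(len(lst)-1):
--         if lst[i]>lst[i+1]:
--             lst[i+1]=lst[i]
--         else:
--             continue
--     count_dict = {}
--     for element in lst:
--         if element in count_dict:
--             count_dict[element] += 1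
--         else:
--             count_dict[element] = 1
--     answer = list(count_dict.values())
--
--     return answer
-- ===== SOURCE B (Python) =====
-- def solution(progresses, speeds):
--     # Single pass: closed-form days per task, group on the fly.
--     answer = []
--     cur = 0
--     count = 0
--     for p, s in zip(progresses, speeds):
--         d = max(1, -((p - 100) // s))
--         if count > 0 and d <= cur:
--             count += 1
--         else:
--             if count > 0:
--                 answer.append(count)
--             cur = d
--             count = 1
--     if count > 0:
--         answer.append(count)
--     return answer
-- ===== Notes on version B (the rewrite author's own statement) =====
-- stated objective: simpler
-- what changed: Replaces the day-by-day simulation loop, the separate max-propagation pass and the counting dict by a closed-form ceiling-division days formula and one single grouping pass with a running group maximum and counter.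
-- outside the precondition, e.g. on solution([100], [0]): A returns [1], B raises ZeroDivisionError; on solution([95, 150], [5, -10]): A returns [2], B returns [1, 1]
import Mathlib
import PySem

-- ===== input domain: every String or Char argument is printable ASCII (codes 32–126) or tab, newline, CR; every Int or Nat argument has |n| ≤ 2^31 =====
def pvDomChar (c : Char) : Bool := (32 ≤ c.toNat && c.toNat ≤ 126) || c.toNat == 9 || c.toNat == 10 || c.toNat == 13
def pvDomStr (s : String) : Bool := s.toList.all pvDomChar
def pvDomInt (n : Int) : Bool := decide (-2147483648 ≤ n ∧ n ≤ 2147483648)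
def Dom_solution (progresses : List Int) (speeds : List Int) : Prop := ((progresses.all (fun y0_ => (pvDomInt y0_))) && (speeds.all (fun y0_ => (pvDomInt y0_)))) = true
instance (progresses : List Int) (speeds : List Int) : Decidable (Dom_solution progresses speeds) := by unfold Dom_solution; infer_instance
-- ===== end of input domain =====

-- B replaces A's day-by-day simulation + max-propagation pass + counting dict by a closed-form
-- ceiling-division days formula and one grouping pass (simpler). A mutates `progresses` in place;
-- B does not — the equivalence proved here is about the RETURN value only.

-- ===== PORT A =====
-- A's inner `while True` loop; the fuel argument only makes the loop total (it is always
-- sufficient under Pre_, where speeds are positive), it is not an algorithm switch.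
def solWhile (s : Int) : Nat → Int × Int → Int × Int
  | 0, st => st
  | fuel + 1, (p, cnt) =>
      let p' := p + s
      let cnt' := cnt + 1
      if p' ≥ 100 then (p', cnt') else solWhile s fuel (p', cnt')

-- A's second loop: in-place forward max propagation `if lst[i] > lst[i+1]: lst[i+1] = lst[i]`.
def solProp : List Int → List Int
  | [] => []
  | [a] => [a]
  | a :: b :: t => a :: solProp ((if a > b then a else b) :: t)
termination_by l => l.length
decreasing_by simp

def solution (progresses : List Int) (speeds : List Int) : List Int :=
  let lst := (PySem.List.pyRange 0 (PySem.List.len speeds) 1).foldl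
    (fun acc i =>
      let p := PySem.List.pyGetD progresses i 0
      let s := PySem.List.pyGetD speeds i 0
      acc ++ [(solWhile s ((100 - p).toNat + 1) (p, 0)).2]) []
  let lst2 := solProp lst
  let countDict := lst2.foldl
    (fun d e => if d.contains e then d.insert e (d.getD e 0 + 1) else d.insert e 1)
    (PySem.Dict.empty : PySem.Dict Int Int)
  countDict.values

-- ===== PORT B =====
def dayAlt (p : Int) (s : Int) : Int := max 1 (-(PySem.Int.floordiv (p - 100) s))

def solution_alt (progresses : List Int) (speeds : List Int) : List Int :=
  let st := (progresses.zip speeds).foldl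
    (fun st ps =>
      let d := dayAlt ps.1 ps.2
      if 0 < st.2.2 ∧ d ≤ st.2.1 then (st.1, st.2.1, st.2.2 + 1)
      else ((if 0 < st.2.2 then st.1 ++ [st.2.2] else st.1), d, 1))
    (([], 0, 0) : List Int × Int × Int)
  if 0 < st.2.2 then st.1 ++ [st.2.2] else st.1

-- ===== PRECONDITION & SPEC =====
-- Pre_ excludes non-positive speeds (there A loops forever unless progress+speed is already ≥ 100,
-- a corner where B's closed form would divide by zero or group by different day counts) and
-- speeds longer than progresses (there A raises IndexError).
def Pre_solution (progresses : List Int) (speeds : List Int) : Prop :=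
  speeds.length ≤ progresses.length ∧ ∀ s ∈ speeds, 0 < s
instance (progresses : List Int) (speeds : List Int) : Decidable (Pre_solution progresses speeds) := by
  unfold Pre_solution; infer_instance
def pvWitness_solution : List Int × List Int := ([93, 30, 55], [1, 30, 5])
def Spec_solution (progresses : List Int) (speeds : List Int) (out : List Int) : Prop := out = solution_alt progresses speeds
instance (progresses : List Int) (speeds : List Int) (out : List Int) : Decidable (Spec_solution progresses speeds out) := by unfold Spec_solution; infer_instance

-- ===== CLAIM (what is proved, stated in full; the proofs are below) =====
def Claim_equal_solution : Prop := ∀ (progresses : List Int) (speeds : List Int), Dom_solution progresses speeds → Pre_solution progresses speeds → Spec_solution progresses speeds (solution progresses speeds)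

-- ===== LEMMAS AND PROOFS =====

-- the one grouping pass, as a pure recursion (proof-side common form of both programs)
def grp : Int → Int → List Int → List Int
  | _, c, [] => [c]
  | m, c, d :: t => if d ≤ m then grp m (c + 1) t else c :: grp d 1 t

-- running maximum with carry (what A's propagation pass computes past the head)
def runMax (m : Int) : List Int → List Int
  | [] => []
  | d :: t => max m d :: runMax (max m d) t

theorem le_of_mem_runMax {x m : Int} {t : List Int} (h : x ∈ runMax m t) : m ≤ x := by
  induction t generalizing m with
  | nil => simp [runMax] at h
  | cons d t ih =>
    simp only [runMax, List.mem_cons] at h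
    rcases h with h | h
    · omega
    · have := ih h; omega

theorem solProp_cons (a : Int) (t : List Int) : solProp (a :: t) = a :: runMax a t := by
  induction t generalizing a with
  | nil => simp [solProp, runMax]
  | cons b t ih =>
    have hmax : (if a > b then a else b) = max a b := by omega
    simp only [solProp, hmax, ih, runMax]

theorem solWhile_snd (s : Int) (hs : 0 < s) :
    ∀ (fuel : Nat) (p cnt : Int),
      (max 1 (-(PySem.Int.floordiv (p - 100) s))).toNat ≤ fuel →
      (solWhile s fuel (p, cnt)).2 = cnt + max 1 (-(PySem.Int.floordiv (p - 100) s)) := by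
  intro fuel
  induction fuel with
  | zero => intro p cnt h; exfalso; omega
  | succ n ih =>
    intro p cnt h
    have key : -(PySem.Int.floordiv (p - 100) s) = -(PySem.Int.floordiv (-(100 - p)) s) := by ring_nf
    set q := -(PySem.Int.floordiv (p - 100) s) with hq
    have hbr : (q - 1) * s < 100 - p ∧ 100 - p ≤ q * s :=
      (PySem.Int.neg_floordiv_neg_eq_iff_of_pos hs).mp key.symm
    simp only [solWhile]
    by_cases hstop : p + s ≥ 100
    · have hq1 : q ≤ 1 := by
        by_contra hc
        push Not at hc
        have : 1 * s ≤ (q - 1) * s := by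
          apply mul_le_mul_of_nonneg_right <;> omega
        omega
      simp [hstop]
      omega
    · push Not at hstop
      have hq2 : 2 ≤ q := by
        by_contra hc
        push Not at hc
        have : q * s ≤ 1 * s := by
          apply mul_le_mul_of_nonneg_right <;> omega
        omega
      have key2 : p + s - 100 = -(100 - (p + s)) := by ring
      have hq' : -(PySem.Int.floordiv (p + s - 100) s) = q - 1 := by
        rw [key2]
        rw [PySem.Int.neg_floordiv_neg_eq_iff_of_pos hs]
        constructor
        · nlinarith [hbr.1]
        · nlinarith [hbr.2]
      have hmax : max 1 q = q := by omega
      have hmax' : max 1 (q - 1) = q - 1 := by omega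
      have hrec := ih (p + s) (cnt + 1) (by rw [hq', hmax']; omega)
      rw [if_neg (by omega), hrec, hq', hmax, hmax']
      omega

theorem fuel_ok (p s : Int) (hs : 0 < s) :
    (max 1 (-(PySem.Int.floordiv (p - 100) s))).toNat ≤ (100 - p).toNat + 1 := by
  have key : p - 100 = -(100 - p) := by ring
  set q := -(PySem.Int.floordiv (p - 100) s) with hq
  have hbr : (q - 1) * s < 100 - p ∧ 100 - p ≤ q * s :=
    (PySem.Int.neg_floordiv_neg_eq_iff_of_pos hs).mp (by rw [hq, key])
  by_cases h1 : q ≤ 1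
  · omega
  · push Not at h1
    have : (q - 1) * 1 ≤ (q - 1) * s := by
      apply mul_le_mul_of_nonneg_left <;> omega
    omega

theorem solWhile_dayAlt (p s : Int) (hs : 0 < s) :
    (solWhile s ((100 - p).toNat + 1) (p, 0)).2 = dayAlt p s := by
  rw [solWhile_snd s hs _ p 0 (fuel_ok p s hs), dayAlt]
  omega

theorem lst_eq (progresses speeds : List Int) (hlen : speeds.length ≤ progresses.length)
    (hsp : ∀ s ∈ speeds, 0 < s) :
    (PySem.List.pyRange 0 (PySem.List.len speeds) 1).foldl
      (fun acc i =>
        let p := PySem.List.pyGetD progresses i 0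
        let s := PySem.List.pyGetD speeds i 0
        acc ++ [(solWhile s ((100 - p).toNat + 1) (p, 0)).2]) []
      = (progresses.zip speeds).map (fun ps => dayAlt ps.1 ps.2) := by
  rw [PySem.List.foldl_append_singleton_eq_map]
  simp only [List.nil_append]
  apply List.ext_getElem
  · simp [PySem.List.length_pyRange_one, PySem.List.len]
    omega
  · intro k h1 h2
    have hk : k < speeds.length := by
      simpa [PySem.List.length_pyRange_one, PySem.List.len] using h1
    have hkp : k < progresses.length := by omega
    simp only [List.getElem_map, PySem.List.getElem_pyRange_one, List.getElem_zip]
    have e1 : (0 : Int) + (k : Int) = (k : Int) := by omega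
    rw [e1]
    rw [PySem.List.pyGetD_eq_getElem progresses 0 (by omega) (by exact_mod_cast hkp),
        PySem.List.pyGetD_eq_getElem speeds 0 (by omega) (by exact_mod_cast hk)]
    simp only [Int.toNat_natCast]
    exact solWhile_dayAlt _ _ (hsp _ (by exact List.getElem_mem _))

theorem foldl_add_cons (m : Int) (rest : List Int) (s : List Int) (hm : m ∉ rest) :
    List.foldl PySem.Set.add (m :: s) rest = m :: List.foldl PySem.Set.add s rest := by
  induction rest generalizing s with
  | nil => rfl
  | cons d t ih =>
    have hne : d ≠ m := by
      intro h; subst h; simp at hm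
    simp only [List.foldl_cons]
    rw [show PySem.Set.add (m :: s) d = m :: PySem.Set.add s d by
      simp [PySem.Set.add, PySem.Set.contains]
      split <;> rename_i hc2
      · rw [if_pos (by tauto)]
      · rw [if_neg (by tauto)]]
    exact ih _ (by simp_all)

theorem foldl_add_replicate (m : Int) : ∀ (c : Nat), 0 < c →
    List.foldl PySem.Set.add ([] : List Int) (List.replicate c m) = [m] := by
  intro c
  induction c with
  | zero => omega
  | succ n ih =>
    intro _
    rcases Nat.eq_zero_or_pos n with h | h
    · subst h; rfl
    · rw [List.replicate_succ', List.foldl_append, ih h]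
      simp [PySem.Set.add, PySem.Set.contains]

theorem ofList_replicate_append (c : Nat) (hc : 0 < c) (m : Int) (rest : List Int) (hm : m ∉ rest) :
    PySem.Set.ofList (List.replicate c m ++ rest) = m :: PySem.Set.ofList rest := by
  have h1 : PySem.Set.ofList (List.replicate c m ++ rest)
      = List.foldl PySem.Set.add (List.foldl PySem.Set.add [] (List.replicate c m)) rest := by
    rw [PySem.Set.ofList_eq_foldl, List.foldl_append]
  rw [h1, foldl_add_replicate m c hc, foldl_add_cons m rest [] hm, PySem.Set.ofList_eq_foldl]

theorem map_count_ofList (ds : List Int) : ∀ (m : Int) (c : Nat), 0 < c →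
    (PySem.Set.ofList (List.replicate c m ++ runMax m ds)).map
      (fun k => (((List.replicate c m ++ runMax m ds).count k : Nat) : Int))
      = grp m (c : Int) ds := by
  induction ds with
  | nil =>
    intro m c hc
    simp only [runMax, grp]
    rw [ofList_replicate_append c hc m [] (by simp)]
    simp [List.count_replicate_self]
  | cons d t ih =>
    intro m c hc
    simp only [runMax, grp]
    by_cases hd : d ≤ m
    · have hM : max m d = m := by omega
      rw [hM, if_pos hd, List.append_cons, ← List.replicate_succ']
      have := ih m (c + 1) (by omega)
      rw [this]
      push_cast
      ring_nf
    · have hM : max m d = d := by omega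
      rw [if_neg hd, hM]
      have hmem : m ∉ d :: runMax d t := by
        intro h
        rcases List.mem_cons.mp h with h | h
        · omega
        · have := le_of_mem_runMax h; omega
      rw [ofList_replicate_append c hc m _ hmem]
      simp only [List.map_cons]
      have hcount : (List.replicate c m ++ d :: runMax d t).count m = c := by
        simp [List.count_append, List.count_replicate_self,
              List.count_eq_zero_of_not_mem hmem]
      rw [hcount]
      congr 1
      have hmap : ∀ k ∈ PySem.Set.ofList (d :: runMax d t),
          ((List.replicate c m ++ d :: runMax d t).count k : Int)
            = ((List.replicate 1 d ++ runMax d t).count k : Int) := by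
        intro k hk
        have hkmem : k ∈ d :: runMax d t := by
          exact (PySem.Set.mem_ofList _ _).mp hk
        have hkm : k ≠ m := by intro h; subst h; exact hmem hkmem
        rw [List.count_append, List.count_eq_zero_of_not_mem (by
          intro h; exact hkm (List.eq_of_mem_replicate h))]
        simp
      calc (PySem.Set.ofList (d :: runMax d t)).map
            (fun k => ((List.replicate c m ++ d :: runMax d t).count k : Int))
          = (PySem.Set.ofList (d :: runMax d t)).map
            (fun k => ((List.replicate 1 d ++ runMax d t).count k : Int)) :=
            List.map_congr_left hmap
        _ = grp d 1 t := by
            have := ih d 1 (by omega)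
            simpa using this

def bstep (st : List Int × Int × Int) (d : Int) : List Int × Int × Int :=
  if 0 < st.2.2 ∧ d ≤ st.2.1 then (st.1, st.2.1, st.2.2 + 1)
  else ((if 0 < st.2.2 then st.1 ++ [st.2.2] else st.1), d, 1)

def bfin (st : List Int × Int × Int) : List Int :=
  if 0 < st.2.2 then st.1 ++ [st.2.2] else st.1

theorem alt_foldl (ds : List Int) : ∀ (ans : List Int) (m c : Int), 0 < c →
    bfin (ds.foldl bstep (ans, m, c)) = ans ++ grp m c ds := by
  induction ds with
  | nil => intro ans m c hc; simp [bfin, grp, hc]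
  | cons d t ih =>
    intro ans m c hc
    simp only [List.foldl_cons, grp]
    by_cases hd : d ≤ m
    · rw [show bstep (ans, m, c) d = (ans, m, c + 1) by simp [bstep, hc, hd], if_pos hd]
      exact ih ans m (c + 1) (by omega)
    · rw [show bstep (ans, m, c) d = (ans ++ [c], d, 1) by simp [bstep, hc, hd], if_neg hd]
      have := ih (ans ++ [c]) d 1 (by omega)
      simpa using this

theorem alt_eq_grp (progresses speeds : List Int) :
    solution_alt progresses speeds =
      match (progresses.zip speeds).map (fun ps => dayAlt ps.1 ps.2) with
      | [] => []
      | d :: t => grp d 1 t := by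
  have h1 : solution_alt progresses speeds =
      bfin (((progresses.zip speeds).map (fun ps => dayAlt ps.1 ps.2)).foldl bstep ([], 0, 0)) := by
    rw [List.foldl_map]
    rfl
  rw [h1]
  cases h : (progresses.zip speeds).map (fun ps => dayAlt ps.1 ps.2) with
  | nil => simp [bfin]
  | cons d t =>
    simp only [List.foldl_cons]
    rw [show bstep ([], 0, 0) d = ([], d, 1) by simp [bstep]]
    simpa using alt_foldl t [] d 1 (by omega)

theorem a_count_part (ys : List Int) :
    ((solProp ys).foldl
      (fun d e => if d.contains e then d.insert e (d.getD e 0 + 1) else d.insert e 1)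
      (PySem.Dict.empty : PySem.Dict Int Int)).values
    = match ys with
      | [] => []
      | d :: t => grp d 1 t := by
  have hstep : (fun (d : PySem.Dict Int Int) (e : Int) =>
        if d.contains e then d.insert e (d.getD e 0 + 1) else d.insert e 1)
      = fun d e => d.insert e (d.getD e 0 + 1) := by
    funext d e
    by_cases h : d.contains e
    · rw [if_pos h]
    · rw [if_neg h, PySem.Dict.getD_of_not_contains d 0 (by simpa using h)]
      norm_num
  rw [hstep, PySem.Dict.foldl_insert_getD_add_one_eq_counter]
  have hval : ∀ l : List Int, (PySem.Dict.counter l).values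
      = (PySem.Set.ofList l).map (fun k => ((l.count k : Nat) : Int)) := by
    intro l
    simp only [PySem.Dict.values, PySem.Dict.items_counter, List.map_map]
    rfl
  cases ys with
  | nil => simp [solProp, hval, PySem.Set.ofList]
  | cons d t =>
    rw [hval, solProp_cons]
    have : (d : Int) :: runMax d t = List.replicate 1 d ++ runMax d t := by simp
    rw [this]
    simpa using map_count_ofList t d 1 (by omega)

-- ===== VERDICT (by name: the statement is the Claim_ definition above) =====
theorem solution_spec : Claim_equal_solution := by
  unfold Claim_equal_solution
  intro progresses speeds _hdom hpre
  unfold Spec_solution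
  obtain ⟨hlen, hsp⟩ := hpre
  show solution progresses speeds = solution_alt progresses speeds
  rw [alt_eq_grp]
  simp only [solution]
  rw [lst_eq progresses speeds hlen hsp]
  exact a_count_part _
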